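-- pv_equiv track=rewrite | github.com/dogunyoye/advent-of-code-2025 | day10/day10.py | encode_to_bitmask
-- ===== SOURCE A (Python) =====
-- def encode_to_bitmask(pattern: str) -> int:
--     bitmask = 0
--     for ch in pattern:
--         bitmask <<= 1              # shift left to make room
--         if ch == '#':
--             bitmask |= 1           # set the lowest bit
--         elif ch != '.':
--             raise ValueError(f"Invalid character: {ch}")
--     return bitmask
-- ===== SOURCE B (Python) =====
-- def encode_to_bitmask(pattern: str) -> int:
--     for ch in pattern:
--         if ch not in '#.':
--             raise ValueError(f"Invalid character: {ch}")
--     if not pattern: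
--         return 0
--     return int(pattern.translate(str.maketrans('#.', '10')), 2)
-- ===== Notes on version B (the rewrite author's own statement) =====
-- stated objective: idiomatic
-- what changed: B validates the pattern up front, translates '#'/'.' to '1'/'0' and parses the result with int(_, 2) (empty pattern returns 0) instead of A's per-character shift/OR bit loop.
import Mathlib
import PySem

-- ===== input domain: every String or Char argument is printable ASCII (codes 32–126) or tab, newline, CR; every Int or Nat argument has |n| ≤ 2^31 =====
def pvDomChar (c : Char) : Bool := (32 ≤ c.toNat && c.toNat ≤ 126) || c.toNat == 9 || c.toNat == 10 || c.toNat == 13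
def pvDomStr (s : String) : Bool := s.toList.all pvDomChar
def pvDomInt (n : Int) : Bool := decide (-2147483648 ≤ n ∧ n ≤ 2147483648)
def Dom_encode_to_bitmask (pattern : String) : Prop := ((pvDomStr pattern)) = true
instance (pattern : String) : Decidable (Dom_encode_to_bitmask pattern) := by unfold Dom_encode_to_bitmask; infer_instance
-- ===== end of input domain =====

-- B validates up front, translates '#'/'.' to '1'/'0' and parses base 2, instead of A's shift/OR bit loop (idiomatic; same cost).

-- ===== PORT A =====
-- A's loop: bitmask <<= 1; if '#': bitmask |= 1 (on an even number, |1 is +1).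
-- Invalid characters raise ValueError in Python; Pre_ excludes them.
def encode_to_bitmask (pattern : String) : Int :=
  pattern.toList.foldl (fun bitmask ch =>
    let bitmask := bitmask * 2
    if ch = '#' then bitmask + 1 else bitmask) 0

-- ===== PORT B =====
-- pattern.translate(str.maketrans('#.', '10'))
def pvTranslateB (pattern : String) : List Char :=
  pattern.toList.map (fun ch => if ch = '#' then '1' else if ch = '.' then '0' else ch)

-- int(s, 2): hand-ported base-2 parse (exact for nonempty strings of '0'/'1' digits,
-- which is all B ever passes it after validation).
def pvParseBin (digits : List Char) : Int :=
  digits.foldl (fun acc c => acc * 2 + (if c = '1' then 1 else 0)) 0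

def encode_to_bitmask_alt (pattern : String) : Int :=
  if pattern.toList.isEmpty then 0
  else pvParseBin (pvTranslateB pattern)

-- ===== PRECONDITION & SPEC =====
-- Pre_ excludes patterns containing a character other than '#' or '.', on which A raises ValueError.
def Pre_encode_to_bitmask (pattern : String) : Prop :=
  pattern.toList.all (fun ch => ch = '#' || ch = '.') = true
instance (pattern : String) : Decidable (Pre_encode_to_bitmask pattern) := by
  unfold Pre_encode_to_bitmask; infer_instance

def pvWitness_encode_to_bitmask : String := "#.#"

def Spec_encode_to_bitmask (pattern : String) (out : Int) : Prop := out = encode_to_bitmask_alt pattern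
instance (pattern : String) (out : Int) : Decidable (Spec_encode_to_bitmask pattern out) := by unfold Spec_encode_to_bitmask; infer_instance

-- ===== CLAIM (what is proved, stated in full; the proofs are below) =====
def Claim_equal_encode_to_bitmask : Prop := ∀ (pattern : String), Dom_encode_to_bitmask pattern → Pre_encode_to_bitmask pattern → Spec_encode_to_bitmask pattern (encode_to_bitmask pattern)

-- ===== LEMMAS AND PROOFS =====
-- A's fold equals the base-2 parse of the translated digits, for any accumulator.
theorem pv_fold_eq (l : List Char) (hl : ∀ ch ∈ l, ch = '#' ∨ ch = '.') (acc : Int) :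
    l.foldl (fun bitmask ch =>
      let bitmask := bitmask * 2
      if ch = '#' then bitmask + 1 else bitmask) acc =
    (l.map (fun ch => if ch = '#' then '1' else if ch = '.' then '0' else ch)).foldl
      (fun a c => a * 2 + (if c = '1' then 1 else 0)) acc := by
  induction l generalizing acc with
  | nil => rfl
  | cons ch tl ih =>
    simp only [List.map_cons, List.foldl_cons, ih (fun c hc => hl c (List.mem_cons_of_mem _ hc))]
    congr 1
    rcases hl ch List.mem_cons_self with h | h <;> simp [h]

-- ===== VERDICT (by name: the statement is the Claim_ definition above) =====
theorem encode_to_bitmask_spec : Claim_equal_encode_to_bitmask := by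
  intro pattern _ hpre
  unfold Spec_encode_to_bitmask encode_to_bitmask encode_to_bitmask_alt pvParseBin pvTranslateB
  rcases h : pattern.toList with _ | ⟨c, tl⟩
  · simp
  · simp only [List.isEmpty_cons, if_neg (by decide : ¬false = true)]
    have hpre' : ∀ ch ∈ c :: tl, ch = '#' ∨ ch = '.' := by
      rw [Pre_encode_to_bitmask, h] at hpre
      simpa [List.all_eq_true] using hpre
    exact pv_fold_eq _ hpre' 0
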